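-- pv_equiv track=rewrite | github.com/lukasz-malec/Python | zestaw2/zadanie2.py | MyCounter
-- ===== SOURCE A (Python) =====
-- import string
-- from collections import Counter
--
-- def MyCounter(tekst):
--     znaki_specjalne = list(string.whitespace) + list(string.punctuation)
--
--     # usuwanie znaków przystankowych
--     for x in znaki_specjalne:
--         tekst = tekst.replace(x, "")
--
--     litery = [char for char in tekst if char.isalpha()]
--     cyfry = [char for char in tekst if char.isdigit()]
--
--
--     litery.sort()
--     cyfry.sort()
--
--     # Łączenie posortowanych liter i cyfr
--     tekst = "".join(litery) + "".join(cyfry)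
--
--     tekst = str(tekst).lower()
--     licznik = Counter(tekst)
--
--     return licznik
-- ===== SOURCE B (Python) =====
-- from collections import Counter
--
-- def MyCounter(tekst):
--     # one pass: per-character tallies, split into letters and digits
--     alpha = {}
--     digit = {}
--     for c in tekst:
--         if c.isalpha():
--             alpha[c] = alpha.get(c, 0) + 1
--         elif c.isdigit():
--             digit[c] = digit.get(c, 0) + 1
--     # only the (few) distinct keys are sorted; merge case-folded letter tallies
--     out = Counter()
--     for c in sorted(alpha):
--         out[c.lower()] += alpha[c]
--     for c in sorted(digit):
--         out[c] += digit[c]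
--     return out
-- ===== Notes on version B (the rewrite author's own statement) =====
-- stated objective: faster
-- what changed: B replaces A's 60-pass replace loop + sort of all kept characters + Counter over the whole string by a single counting pass into per-character dicts followed by sorting only the distinct keys and merging the case-folded tallies into the Counter.
import Mathlib
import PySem

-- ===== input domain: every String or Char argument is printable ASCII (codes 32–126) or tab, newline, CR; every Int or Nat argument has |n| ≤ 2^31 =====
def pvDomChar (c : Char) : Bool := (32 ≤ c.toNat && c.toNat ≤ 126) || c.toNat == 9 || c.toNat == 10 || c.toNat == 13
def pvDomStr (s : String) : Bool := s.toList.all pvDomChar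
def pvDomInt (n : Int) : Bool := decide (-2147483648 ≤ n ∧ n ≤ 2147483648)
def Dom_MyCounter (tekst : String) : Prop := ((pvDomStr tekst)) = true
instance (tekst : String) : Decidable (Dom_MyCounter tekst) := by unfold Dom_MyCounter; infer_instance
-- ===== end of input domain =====

-- B replaces A's 60-pass replace loop + full sort + Counter of the whole string by one
-- counting pass into per-character dicts, sorting only the distinct keys; objective: faster.

-- ===== PORT A =====
def pyWhitespace : String := " \t\n\r\x0B\x0C"
def pyPunctuation : String := "!\"#$%&'()*+,-./:;<=>?@[\\]^_`{|}~"

def MyCounter (tekst : String) : List (String × Int) :=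
  -- znaki_specjalne = list(string.whitespace) + list(string.punctuation)
  let znaki : List String :=
    pyWhitespace.toList.map (fun c => String.ofList [c]) ++ pyPunctuation.toList.map (fun c => String.ofList [c])
  -- for x in znaki_specjalne: tekst = tekst.replace(x, "")
  let t1 : String := znaki.foldl (fun s x => PySem.Str.replace s x "") tekst
  let litery : List Char := t1.toList.filter PySem.Chars.isalpha
  let cyfry : List Char := t1.toList.filter PySem.Chars.isdigit
  let litery2 := PySem.List.sorted litery (fun c => c)
  let cyfry2 := PySem.List.sorted cyfry (fun c => c)
  -- tekst = "".join(litery) + "".join(cyfry); tekst = str(tekst).lower()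
  let t2 : List Char := PySem.Chars.lower (litery2 ++ cyfry2)
  -- licznik = Counter(tekst)
  (PySem.Dict.counter t2).items.map (fun p => (String.ofList [p.1], p.2))

-- ===== PORT B =====
def MyCounter_alt (tekst : String) : List (String × Int) :=
  -- one pass: alpha/digit per-character tallies (elif keeps the dicts disjoint)
  let p := tekst.toList.foldl
    (fun (p : PySem.Dict Char Int × PySem.Dict Char Int) c =>
      if PySem.Chars.isalpha c then (p.1.insert c (p.1.getD c 0 + 1), p.2)
      else if PySem.Chars.isdigit c then (p.1, p.2.insert c (p.2.getD c 0 + 1))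
      else p)
    (PySem.Dict.empty, PySem.Dict.empty)
  -- out = Counter(); for c in sorted(alpha): out[c.lower()] += alpha[c]
  let out1 := (PySem.List.sorted p.1.keys (fun c => c)).foldl
    (fun d c => d.insert (PySem.Chars.lowerChar c) (d.getD (PySem.Chars.lowerChar c) 0 + p.1.getD c 0))
    PySem.Dict.empty
  -- for c in sorted(digit): out[c] += digit[c]
  let out2 := (PySem.List.sorted p.2.keys (fun c => c)).foldl
    (fun d c => d.insert c (d.getD c 0 + p.2.getD c 0)) out1
  out2.items.map (fun q => (String.ofList [q.1], q.2))

-- ===== PRECONDITION & SPEC =====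
def Spec_MyCounter (tekst : String) (out : List (String × Int)) : Prop := out = MyCounter_alt tekst
instance (tekst : String) (out : List (String × Int)) : Decidable (Spec_MyCounter tekst out) := by unfold Spec_MyCounter; infer_instance

-- ===== CLAIM (what is proved, stated in full; the proofs are below) =====
def Claim_equal_MyCounter : Prop := ∀ (tekst : String), Dom_MyCounter tekst → Spec_MyCounter tekst (MyCounter tekst)

-- ===== LEMMAS AND PROOFS =====

-- replace.go with a single-character pattern and empty replacement is a filter
theorem replace_go_single (x : Char) (fuel : Nat) (l acc : List Char) (h : l.length ≤ fuel) :
    PySem.Chars.replace.go [x] [] fuel l acc = acc.reverse ++ l.filter (fun c => c != x) := by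
  induction fuel generalizing l acc with
  | zero =>
    cases l with
    | nil => simp [PySem.Chars.replace.go]
    | cons c t => simp at h
  | succ n ih =>
    cases l with
    | nil => simp [PySem.Chars.replace.go]
    | cons c t =>
      simp only [PySem.Chars.replace.go]
      by_cases hcx : c = x
      · subst hcx
        have : List.isPrefixOf [c] (c :: t) = true := by simp [List.isPrefixOf]
        simp only [this]
        rw [if_pos trivial]
        rw [ih _ _ (by simpa using Nat.le_of_succ_le_succ h)]
        simp [List.filter]
      · have : List.isPrefixOf [x] (c :: t) = false := by
          simp [List.isPrefixOf]; exact fun hx => (hcx hx.symm).elim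
        simp only [this, Bool.false_eq_true, if_false]
        rw [ih _ _ (by simpa using Nat.le_of_succ_le_succ h)]
        have hb : (c != x) = true := by simp [hcx]
        simp [List.filter, hb]

theorem replace_single (x : Char) (s : List Char) :
    PySem.Chars.replace s [x] [] = s.filter (fun c => c != x) := by
  rw [PySem.Chars.replace]
  rw [if_neg (by simp)]
  exact replace_go_single x s.length s [] (le_refl _)

-- filtering by p after removing a character with p c = false is filtering by p
theorem filter_replace_single (p : Char → Bool) (x : Char) (hx : p x = false) (s : List Char) :
    (PySem.Chars.replace s [x] []).filter p = s.filter p := by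
  rw [replace_single, List.filter_filter]
  apply List.filter_congr
  intro c _
  by_cases hc : p c
  · have : c ≠ x := fun h => by rw [h, hx] at hc; exact Bool.noConfusion hc
    simp [hc, this]
  · simp [Bool.eq_false_iff.mpr hc]

-- the whole removal loop preserves the p-filter when no special char satisfies p
theorem filter_foldl_replace (p : Char → Bool) (znaki : List Char)
    (h : ∀ x ∈ znaki, p x = false) (s : String) :
    ((znaki.map (fun c => String.ofList [c])).foldl (fun s x => PySem.Str.replace s x "") s).toList.filter p
      = s.toList.filter p := by
  induction znaki generalizing s with
  | nil => rfl
  | cons c t ih =>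
    simp only [List.map_cons, List.foldl_cons]
    rw [ih (fun x hx => h x (List.mem_cons_of_mem _ hx))]
    have : (PySem.Str.replace s (String.ofList [c]) "").toList = PySem.Chars.replace s.toList [c] [] := by
      rw [PySem.Str.toList_replace]
      simp
    rw [this, filter_replace_single p c (h c (List.mem_cons_self ..))]

-- a digit is not a letter
theorem isdigit_not_isalpha (c : Char) (h : PySem.Chars.isdigit c = true) :
    PySem.Chars.isalpha c = false := by
  simp only [PySem.Chars.isdigit, PySem.Chars.isalpha, PySem.Chars.isupper, PySem.Chars.islower,
    Bool.or_eq_false_iff, Bool.and_eq_true, decide_eq_true_eq, Bool.and_eq_false_iff,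
    decide_eq_false_iff_not, Char.le_def, UInt32.le_iff_toNat_le] at *
  have h9 : ('9'.val).toNat = 57 := rfl
  have hA : ('A'.val).toNat = 65 := rfl
  have ha : ('a'.val).toNat = 97 := rfl
  exact ⟨Or.inl (by omega), Or.inl (by omega)⟩

-- lower() fixes digits
theorem lowerChar_of_isdigit (c : Char) (h : PySem.Chars.isdigit c = true) :
    PySem.Chars.lowerChar c = c := by
  have hu : PySem.Chars.isupper c = false := by
    simp only [PySem.Chars.isdigit, PySem.Chars.isupper,
      Bool.and_eq_true, decide_eq_true_eq, Bool.and_eq_false_iff,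
      decide_eq_false_iff_not, Char.le_def, UInt32.le_iff_toNat_le] at *
    have h9 : ('9'.val).toNat = 57 := rfl
    have hA : ('A'.val).toNat = 65 := rfl
    exact Or.inl (by omega)
  simp [PySem.Chars.lowerChar, hu]

-- a guarded fold is a fold over the filter
theorem foldl_if_filter {α β : Type} (q : α → Bool) (h : β → α → β) (l : List α) (init : β) :
    l.foldl (fun d c => if q c then h d c else d) init = (l.filter q).foldl h init := by
  induction l generalizing init with
  | nil => rfl
  | cons a t ih => by_cases hq : q a <;> simp [List.filter, hq, ih]

-- B's single counting pass splits into its two per-dict loops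
theorem pair_fold (t : List Char) (d1 d2 : PySem.Dict Char Int) :
    t.foldl (fun (p : PySem.Dict Char Int × PySem.Dict Char Int) c =>
        if PySem.Chars.isalpha c then (p.1.insert c (p.1.getD c 0 + 1), p.2)
        else if PySem.Chars.isdigit c then (p.1, p.2.insert c (p.2.getD c 0 + 1))
        else p) (d1, d2)
      = (t.foldl (fun d c => if PySem.Chars.isalpha c then d.insert c (d.getD c 0 + 1) else d) d1,
         t.foldl (fun d c => if !PySem.Chars.isalpha c && PySem.Chars.isdigit c then d.insert c (d.getD c 0 + 1) else d) d2) := by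
  induction t generalizing d1 d2 with
  | nil => rfl
  | cons a t ih =>
    by_cases h1 : PySem.Chars.isalpha a
    · simp [h1, ih]
    · by_cases h2 : PySem.Chars.isdigit a <;> simp [h1, h2, ih]

-- getD after a keyed insert-accumulate loop
theorem getD_foldl_insert_key (f : Char → Char) (v : Char → Int) (l : List Char)
    (d : PySem.Dict Char Int) (x : Char) :
    (l.foldl (fun d c => d.insert (f c) (d.getD (f c) 0 + v c)) d).getD x 0
      = d.getD x 0 + (l.map (fun c => if f c = x then v c else 0)).sum := by
  induction l generalizing d with
  | nil => simp
  | cons a t ih =>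
    simp only [List.foldl_cons, List.map_cons, List.sum_cons, ih, PySem.Dict.getD_insert]
    by_cases hx : x = f a
    · simp [hx, eq_comm]; ring
    · have : ¬ f a = x := fun he => hx he.symm
      simp [hx, this]

-- identity-keyed special case of the previous lemma
theorem getD_foldl_insert_id (v : Char → Int) (l : List Char)
    (d : PySem.Dict Char Int) (x : Char) :
    (l.foldl (fun d c => d.insert c (d.getD c 0 + v c)) d).getD x 0
      = d.getD x 0 + (l.map (fun c => if c = x then v c else 0)).sum := by
  simpa using getD_foldl_insert_key (fun c => c) v l d x

-- set(xs) is a sublist of xs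
theorem ofList_sublist {α : Type} [BEq α] [LawfulBEq α] (xs : List α) :
    (PySem.Set.ofList xs).Sublist xs := by
  induction xs with
  | nil => simp [PySem.Set.ofList_nil]
  | cons a t ih =>
    rw [PySem.Set.ofList_cons]
    refine List.Sublist.cons₂ a (List.Sublist.trans ?_ ih)
    simp only [PySem.Set.discard]
    exact List.filter_sublist

-- sorting the distinct elements = the distinct elements of the sorted list
theorem sorted_dedup (l : List Char) :
    PySem.List.sorted (PySem.List.dedup l) (fun c => c)
      = PySem.List.dedup (PySem.List.sorted l (fun c => c)) := by
  apply PySem.List.sorted_eq_of_perm_of_pairwise_lt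
  · rw [List.perm_ext_iff_of_nodup]
    · intro a
      simp only [PySem.List.dedup, PySem.Set.mem_ofList, PySem.List.mem_sorted]
    · simp [PySem.List.dedup, PySem.Set.nodup_ofList]
    · simp [PySem.List.dedup, PySem.Set.nodup_ofList]
  · have hle : (PySem.List.sorted l (fun c => c)).Pairwise (fun a b => a ≤ b) :=
      PySem.List.sorted_pairwise l _
    have hle' := List.Pairwise.sublist (ofList_sublist _) hle
    have hnd : (PySem.List.dedup (PySem.List.sorted l (fun c => c))).Nodup := by
      simp [PySem.List.dedup, PySem.Set.nodup_ofList]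
    exact (hle'.and hnd).imp (fun h => lt_of_le_of_ne h.1 h.2)

-- dedup before mapping does not change the set of images
theorem ofList_map_ofList (f : Char → Char) (m : List Char) :
    PySem.Set.ofList ((PySem.Set.ofList m).map f) = PySem.Set.ofList (m.map f) := by
  induction m using List.reverseRecOn with
  | nil => rfl
  | append_singleton t x ih =>
    have hr : (t ++ [x]).map f = t.map f ++ [f x] := by simp
    rw [hr, PySem.Set.ofList_append_singleton, PySem.Set.ofList_append_singleton,
        PySem.Set.add_eq_ite]
    by_cases hx : x ∈ PySem.Set.ofList t
    · rw [if_pos hx, ih, PySem.Set.add_of_mem]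
      rw [PySem.Set.mem_ofList]
      exact List.mem_map_of_mem ((PySem.Set.mem_ofList _ _).mp hx)
    · rw [if_neg hx]
      have h2 : (PySem.Set.ofList t ++ [x]).map f = (PySem.Set.ofList t).map f ++ [f x] := by simp
      rw [h2, PySem.Set.ofList_append_singleton, ih]

-- updating by a dedup'd list = updating by the list
theorem update_ofList_right (s : PySem.Set Char) (l : List Char) :
    PySem.Set.update s (PySem.Set.ofList l) = PySem.Set.update s l := by
  rw [PySem.Set.update_eq_append_filter, PySem.Set.update_eq_append_filter, PySem.Set.ofList_ofList]

-- count of an image as a sum over covering distinct keys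
theorem count_map_eq_sum (f : Char → Char) (x : Char) : ∀ (ks m : List Char),
    ks.Nodup → (∀ c ∈ m, c ∈ ks) →
    ((m.map f).count x : Int) = (ks.map (fun c => if f c = x then (m.count c : Int) else 0)).sum := by
  intro ks
  induction ks with
  | nil =>
    intro m _ hcov
    have : m = [] := List.eq_nil_iff_forall_not_mem.mpr (fun a ha => by simpa using hcov a ha)
    simp [this]
  | cons k ks ih =>
    intro m hnd hcov
    have hperm : (m.filter (· == k) ++ m.filter (fun c => !(c == k))).Perm m :=
      List.filter_append_perm _ m
    have hcnt : (m.map f).count x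
        = ((m.filter (· == k)).map f).count x + ((m.filter (fun c => !(c == k))).map f).count x := by
      rw [← List.count_append, ← List.map_append]
      exact (List.Perm.count_eq (List.Perm.map f hperm) x).symm
    have hrep : m.filter (· == k) = List.replicate (m.count k) k := List.filter_beq (l := m) (a := k)
    have h1 : ((m.filter (· == k)).map f).count x = if f k = x then m.count k else 0 := by
      rw [hrep, List.map_replicate, List.count_replicate]
      by_cases hfk : f k = x
      · simp [hfk]
      · simp [hfk]
    have hm2 : ∀ c ∈ m.filter (fun c => !(c == k)), c ∈ ks := by
      intro c hc
      simp only [List.mem_filter, Bool.not_eq_eq_eq_not] at hc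
      have := hcov c hc.1
      simp only [List.mem_cons] at this
      rcases this with h | h
      · exact absurd h (by simpa using hc.2)
      · exact h
    have ih2 := ih (m.filter (fun c => !(c == k))) hnd.of_cons hm2
    have hcong : (ks.map (fun c => if f c = x then ((m.filter (fun c => !(c == k))).count c : Int) else 0))
        = ks.map (fun c => if f c = x then (m.count c : Int) else 0) := by
      apply List.map_congr_left
      intro c hc
      have hck : c ≠ k := fun h => (List.nodup_cons.mp hnd).1 (h ▸ hc)
      rw [List.count_filter (by simp [hck])]
    simp only [List.map_cons, List.sum_cons]
    rw [hcnt]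
    push_cast
    rw [h1, ih2, hcong]
    by_cases hfk : f k = x <;> simp [hfk]

-- ===== VERDICT (by name: the statement is the Claim_ definition above) =====
theorem MyCounter_spec : Claim_equal_MyCounter := by
  intro tekst _
  unfold Spec_MyCounter MyCounter MyCounter_alt
  have hz : (pyWhitespace.toList.map (fun c => String.ofList [c]) ++ pyPunctuation.toList.map (fun c => String.ofList [c]))
      = (pyWhitespace.toList ++ pyPunctuation.toList).map (fun c => String.ofList [c]) := by
    rw [List.map_append]
  rw [hz]
  have halpha : ∀ x ∈ pyWhitespace.toList ++ pyPunctuation.toList, PySem.Chars.isalpha x = false := by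
    have h : ((pyWhitespace.toList ++ pyPunctuation.toList).all (fun x => !PySem.Chars.isalpha x)) = true := by decide
    intro x hx; simpa using List.all_eq_true.mp h x hx
  have hdigit : ∀ x ∈ pyWhitespace.toList ++ pyPunctuation.toList, PySem.Chars.isdigit x = false := by
    have h : ((pyWhitespace.toList ++ pyPunctuation.toList).all (fun x => !PySem.Chars.isdigit x)) = true := by decide
    intro x hx; simpa using List.all_eq_true.mp h x hx
  dsimp only
  rw [filter_foldl_replace PySem.Chars.isalpha _ halpha tekst]
  rw [filter_foldl_replace PySem.Chars.isdigit _ hdigit tekst]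
  rw [pair_fold]
  dsimp only
  simp only [foldl_if_filter]
  have hq : tekst.toList.filter (fun c => !PySem.Chars.isalpha c && PySem.Chars.isdigit c)
      = tekst.toList.filter PySem.Chars.isdigit := by
    apply List.filter_congr
    intro c _
    by_cases hd : PySem.Chars.isdigit c
    · simp [hd, isdigit_not_isalpha c hd]
    · simp [hd]
  rw [hq, PySem.Dict.foldl_insert_getD_add_one_eq_counter, PySem.Dict.foldl_insert_getD_add_one_eq_counter]
  set lit := List.filter PySem.Chars.isalpha tekst.toList with hlit
  set cyf := List.filter PySem.Chars.isdigit tekst.toList with hcyf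
  set slit := PySem.List.sorted lit (fun c => c) with hslit
  set scyf := PySem.List.sorted cyf (fun c => c) with hscyf
  have hdigmem : ∀ c ∈ scyf, PySem.Chars.isdigit c = true := by
    intro c hc
    have : c ∈ cyf := (PySem.List.mem_sorted cyf _ _ _).mp hc
    exact (List.mem_filter.mp (hcyf ▸ this)).2
  have hsrw : PySem.Chars.lower (slit ++ scyf) = slit.map PySem.Chars.lowerChar ++ scyf := by
    simp only [PySem.Chars.lower, List.map_append]
    congr 1
    calc scyf.map PySem.Chars.lowerChar = scyf.map id :=
          List.map_congr_left (fun c hc => lowerChar_of_isdigit c (hdigmem c hc))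
      _ = scyf := List.map_id _
  rw [hsrw]
  set s := slit.map PySem.Chars.lowerChar ++ scyf with hs
  set ak := PySem.List.sorted (PySem.Dict.counter lit).keys (fun c => c) with hak
  set dk := PySem.List.sorted (PySem.Dict.counter cyf).keys (fun c => c) with hdk
  set out1 := List.foldl (fun d c => d.insert (PySem.Chars.lowerChar c)
      (d.getD (PySem.Chars.lowerChar c) 0 + (PySem.Dict.counter lit).getD c 0)) PySem.Dict.empty ak with hout1
  set out2 := List.foldl (fun d c => d.insert c (d.getD c 0 + (PySem.Dict.counter cyf).getD c 0)) out1 dk with hout2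
  -- dedup characterisation of the key lists
  have hakd : ak = PySem.List.dedup slit := by
    rw [hak, PySem.Dict.keys_counter, ← PySem.List.dedup_eq_ofList, sorted_dedup, hslit]
  have hdkd : dk = PySem.List.dedup scyf := by
    rw [hdk, PySem.Dict.keys_counter, ← PySem.List.dedup_eq_ofList, sorted_dedup, hscyf]
  -- keys of B's result
  have h1k : out1.keys = PySem.Set.ofList (ak.map PySem.Chars.lowerChar) := by
    rw [hout1]
    simp only [PySem.Dict.keys_foldl_insert_key, PySem.Dict.keys_empty, PySem.Set.update_nil_left]
  have h2k : out2.keys = PySem.Set.update out1.keys dk := by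
    rw [hout2]
    simp only [PySem.Dict.keys_foldl_insert]
  have hkeys : out2.keys = PySem.Set.ofList s := by
    rw [h2k, h1k, hakd, hdkd, hs, PySem.Set.ofList_append]
    rw [show PySem.List.dedup slit = PySem.Set.ofList slit from PySem.List.dedup_eq_ofList _]
    rw [show PySem.List.dedup scyf = PySem.Set.ofList scyf from PySem.List.dedup_eq_ofList _]
    rw [ofList_map_ofList, update_ofList_right]
  -- values of B's result
  have hndak : ak.Nodup := by
    rw [hakd]
    simp only [PySem.List.dedup_eq_ofList]
    exact PySem.Set.nodup_ofList _
  have hnddk : dk.Nodup := by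
    rw [hdkd]
    simp only [PySem.List.dedup_eq_ofList]
    exact PySem.Set.nodup_ofList _
  have hcovak : ∀ c ∈ slit, c ∈ ak := by
    intro c hc
    rw [hakd]
    exact (PySem.List.mem_dedup _ _).mpr hc
  have hcovdk : ∀ c ∈ scyf, c ∈ dk := by
    intro c hc
    rw [hdkd]
    exact (PySem.List.mem_dedup _ _).mpr hc
  have hgd : ∀ k, out2.getD k 0 = (s.count k : Int) := by
    intro k
    rw [hout2, hout1]
    rw [getD_foldl_insert_id (fun c => (PySem.Dict.counter cyf).getD c 0) dk _ k]
    rw [getD_foldl_insert_key PySem.Chars.lowerChar (fun c => (PySem.Dict.counter lit).getD c 0) ak _ k]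
    rw [PySem.Dict.getD_empty]
    rw [hs, List.count_append]
    push_cast
    have hA : ((slit.map PySem.Chars.lowerChar).count k : Int)
        = (ak.map (fun c => if PySem.Chars.lowerChar c = k then (slit.count c : Int) else 0)).sum :=
      count_map_eq_sum PySem.Chars.lowerChar k ak slit hndak hcovak
    have hD : ((scyf.count k : Int))
        = (dk.map (fun c => if c = k then (scyf.count c : Int) else 0)).sum := by
      have := count_map_eq_sum (fun c => c) k dk scyf hnddk hcovdk
      simpa using this
    rw [hA, hD]
    have hA2 : (ak.map (fun c => if PySem.Chars.lowerChar c = k then (slit.count c : Int) else 0))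
        = ak.map (fun c => if PySem.Chars.lowerChar c = k then (PySem.Dict.counter lit).getD c 0 else 0) := by
      apply List.map_congr_left
      intro c _
      rw [show (slit.count c : Int) = (lit.count c : Int) by
        rw [List.Perm.count_eq (PySem.List.sorted_perm lit _ _) c]]
      rw [PySem.Dict.getD_counter]
    have hD2 : (dk.map (fun c => if c = k then (scyf.count c : Int) else 0))
        = dk.map (fun c => if c = k then (PySem.Dict.counter cyf).getD c 0 else 0) := by
      apply List.map_congr_left
      intro c _
      rw [show (scyf.count c : Int) = (cyf.count c : Int) by
        rw [List.Perm.count_eq (PySem.List.sorted_perm cyf _ _) c]]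
      rw [PySem.Dict.getD_counter]
    rw [hA2, hD2]
    ring
  -- assemble the items lists
  have hnod1 : out1.keys.Nodup := by
    rw [hout1]
    exact PySem.Dict.nodup_keys_foldl_insert_key _ _ _ _ (by simp [PySem.Dict.keys_empty])
  have hnod2 : out2.keys.Nodup := by
    rw [hout2]
    exact PySem.Dict.nodup_keys_foldl_insert _ _ _ hnod1
  have hitems : out2.items = (PySem.Dict.counter s).items := by
    rw [PySem.Dict.items_eq_map_keys out2 hnod2 0, PySem.Dict.items_counter, hkeys]
    apply List.map_congr_left
    intro k _
    rw [hgd k]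
  rw [hitems]
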